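-- pv_equiv track=rewrite | github.com/kfuku52/cdskit | ci/test_commands.py | _mk_misaligned_alignment
-- ===== SOURCE A (Python) =====
-- def _mk_misaligned_alignment(n: int) -> list[str]:
--     """
--     同じungap配列から、非コドン境界で '-' を挿入して“長さは同一”な
--     アラインメント（意図的にズレたギャップ開始）を作る。
--     """
--     base = "ATGAAACCCGGGTTT"  # 15
--     variants = []
--     # 固定の挿入パターン（letters基準でズレた位置）。足りなければループで回す
--     presets = [
--         [1], [4, 5], [2], [7, 8, 9], [10], [13, 14], [3, 6], [5, 11], [2, 12], [4]
--     ]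
--     for i in range(n):
--         pos = presets[i % len(presets)]
--         s = []
--         letters = 0
--         j = 0
--         for ch in base:
--             # ch を入れる前に、必要な位置に '-' を入れる
--             while j < len(pos) and letters == pos[j]:
--                 s.append("-")
--                 j += 1
--             s.append(ch)
--             letters += 1
--         # 余った分の '-'（末尾パディング）
--         while j < len(pos):
--             s.append("-")
--             j += 1
--         variants.append("".join(s))
--     # 全長を揃える（最大長に右パディング）
--     max_len = max(len(v) for v in variants)
--     variants = [v + "-" * (max_len - len(v)) for v in variants]
--     return variants
-- ===== SOURCE B (Python) =====
-- def _mk_misaligned_alignment(n: int) -> list[str]: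
--     base = "ATGAAACCCGGGTTT"  # 15
--     presets = [
--         [1], [4, 5], [2], [7, 8, 9], [10], [13, 14], [3, 6], [5, 11], [2, 12], [4]
--     ]
--     variants = []
--     for i in range(n):
--         pos = presets[i % len(presets)]
--         parts = []
--         prev = 0
--         for p in pos:
--             parts.append(base[prev:p])
--             parts.append("-")
--             prev = p
--         parts.append(base[prev:])
--         variants.append("".join(parts))
--     max_len = max(len(v) for v in variants)
--     return [v + "-" * (max_len - len(v)) for v in variants]
-- ===== Notes on version B (the rewrite author's own statement) =====
-- stated objective: simpler
-- what changed: Per-variant gap insertion is rebuilt by slicing: instead of A's per-character scan with a letters counter and a j index into pos (plus two while loops), B walks pos once keeping a slice boundary prev, emitting base[prev:p] + '-' per position and base[prev:] at the end; the outer loop and final right-padding are unchanged.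
-- outside the precondition, e.g. on _mk_misaligned_alignment(0): A raises ValueError, B raises ValueError
import Mathlib
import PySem

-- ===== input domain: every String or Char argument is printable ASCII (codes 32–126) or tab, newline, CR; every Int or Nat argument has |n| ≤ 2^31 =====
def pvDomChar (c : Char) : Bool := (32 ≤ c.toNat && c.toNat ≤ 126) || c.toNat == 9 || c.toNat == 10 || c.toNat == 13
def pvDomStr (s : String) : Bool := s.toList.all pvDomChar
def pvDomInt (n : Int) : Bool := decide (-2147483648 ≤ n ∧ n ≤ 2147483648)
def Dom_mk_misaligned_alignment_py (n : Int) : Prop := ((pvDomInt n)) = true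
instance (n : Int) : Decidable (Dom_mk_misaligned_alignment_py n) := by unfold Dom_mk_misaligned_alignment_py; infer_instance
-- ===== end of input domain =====

-- B replaces A's per-character scan with letters/j counters by slice-based assembly
-- (base[prev:p] + '-' per gap position, then base[prev:]); objective: simpler. Equal return values; no mutation involved.

-- ===== PORT A =====
def pvBase : List Char := "ATGAAACCCGGGTTT".toList

def pvPresets : List (List Int) :=
  [[1], [4, 5], [2], [7, 8, 9], [10], [13, 14], [3, 6], [5, 11], [2, 12], [4]]

-- the inner 'while j < len(pos) and letters == pos[j]' loop; the index j is carried as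
-- the remaining suffix pos[j:] of the preset list (structurally identical iteration)
def pvWhileGaps (letters : Int) : List Int → List Char → List Char × List Int
  | p :: rest, s => if letters = p then pvWhileGaps letters rest (s ++ ['-']) else (s, p :: rest)
  | [], s => (s, [])

-- body of 'for ch in base'
def pvCharStep (st : List Char × Int × List Int) (ch : Char) : List Char × Int × List Int :=
  let r := pvWhileGaps st.2.1 st.2.2 st.1
  (r.1 ++ [ch], st.2.1 + 1, r.2)

-- the trailing 'while j < len(pos)' padding loop
def pvTrail : List Int → List Char → List Char
  | _ :: rest, s => pvTrail rest (s ++ ['-'])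
  | [], s => s

def pvVariantA (pos : List Int) : List Char :=
  let st := pvBase.foldl pvCharStep ([], 0, pos)
  pvTrail st.2.2 st.1

def mk_misaligned_alignment_py (n : Int) : List String :=
  let variants := (PySem.List.pyRange 0 n 1).foldl
    (fun acc i => acc ++
      [String.ofList (pvVariantA (PySem.List.pyGetD pvPresets (PySem.Int.mod i (pvPresets.length : Int)) []))]) []
  -- max() of the variant lengths; .getD 0 is never used: Pre_ guarantees variants ≠ []
  let maxLen := (PySem.List.max? (variants.map (fun v => PySem.Str.len v)) (fun x => x)).getD 0
  variants.map (fun v => String.ofList (v.toList ++ List.replicate (maxLen - PySem.Str.len v).toNat '-'))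

-- ===== PORT B =====
-- 'for p in pos: parts += base[prev:p] + "-"; prev = p' then 'parts += base[prev:]'
def pvVariantB (pos : List Int) : List Char :=
  let st := pos.foldl
    (fun (st : List Char × Int) p =>
      (st.1 ++ PySem.List.slice pvBase (some st.2) (some p) ++ ['-'], p)) ([], 0)
  st.1 ++ PySem.List.slice pvBase (some st.2) none

def mk_misaligned_alignment_py_alt (n : Int) : List String :=
  let variants := (PySem.List.pyRange 0 n 1).foldl
    (fun acc i => acc ++
      [String.ofList (pvVariantB (PySem.List.pyGetD pvPresets (PySem.Int.mod i (pvPresets.length : Int)) []))]) []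
  let maxLen := (PySem.List.max? (variants.map (fun v => PySem.Str.len v)) (fun x => x)).getD 0
  variants.map (fun v => String.ofList (v.toList ++ List.replicate (maxLen - PySem.Str.len v).toNat '-'))

-- ===== PRECONDITION & SPEC =====
-- Pre_ excludes n ≤ 0, where 'max()' over the empty variants list raises ValueError in A (and in B).
def Pre_mk_misaligned_alignment_py (n : Int) : Prop := 1 ≤ n
instance (n : Int) : Decidable (Pre_mk_misaligned_alignment_py n) := by
  unfold Pre_mk_misaligned_alignment_py; infer_instance

def pvWitness_mk_misaligned_alignment_py : Int := 3

def Spec_mk_misaligned_alignment_py (n : Int) (out : List String) : Prop :=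
  out = mk_misaligned_alignment_py_alt n
instance (n : Int) (out : List String) : Decidable (Spec_mk_misaligned_alignment_py n out) := by
  unfold Spec_mk_misaligned_alignment_py; infer_instance

-- ===== CLAIM =====
def Claim_equal_mk_misaligned_alignment_py : Prop :=
  ∀ (n : Int), Dom_mk_misaligned_alignment_py n → Pre_mk_misaligned_alignment_py n →
    Spec_mk_misaligned_alignment_py n (mk_misaligned_alignment_py n)

-- ===== LEMMAS AND PROOFS =====

-- per-index equality of the two variant builders (only i % 10 matters; ten concrete cases)
theorem pvVariant_eq (i : Int) :
    pvVariantA (PySem.List.pyGetD pvPresets (PySem.Int.mod i (pvPresets.length : Int)) []) =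
    pvVariantB (PySem.List.pyGetD pvPresets (PySem.Int.mod i (pvPresets.length : Int)) []) := by
  have hlen : (pvPresets.length : Int) = 10 := by decide
  rw [hlen]
  have hm : PySem.Int.mod i 10 = i.emod 10 := by
    simp [PySem.Int.mod, Int.fmod_eq_emod]; rfl
  rw [hm]
  have h1 : 0 ≤ i.emod 10 := Int.emod_nonneg i (by norm_num)
  have h2 : i.emod 10 < 10 := Int.emod_lt_of_pos i (by norm_num)
  interval_cases h : i.emod 10 <;> decide

theorem mk_misaligned_alignment_variants_eq (n : Int) :
    (PySem.List.pyRange 0 n 1).foldl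
      (fun acc i => acc ++
        [String.ofList (pvVariantA (PySem.List.pyGetD pvPresets (PySem.Int.mod i (pvPresets.length : Int)) []))]) [] =
    (PySem.List.pyRange 0 n 1).foldl
      (fun acc i => acc ++
        [String.ofList (pvVariantB (PySem.List.pyGetD pvPresets (PySem.Int.mod i (pvPresets.length : Int)) []))]) [] := by
  apply PySem.List.foldl_congr_mem
  intro acc i _
  rw [pvVariant_eq i]

-- ===== VERDICT =====
theorem mk_misaligned_alignment_py_spec : Claim_equal_mk_misaligned_alignment_py := by
  intro n _ _
  unfold Spec_mk_misaligned_alignment_py mk_misaligned_alignment_py mk_misaligned_alignment_py_alt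
  rw [mk_misaligned_alignment_variants_eq n]
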